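-- pv_equiv track=rewrite | github.com/JustWannaFly/PyAOC | 23/src/day07.py | isThreeWild
-- ===== SOURCE A (Python) =====
-- def isThreeOfAKind(bid):
--     firstCard = None
--     firstCount = 0
--     secondCard = None
--     secondCount = 0
--     thirdCard = None
--     thirdCount = 0
--     for card in bid[0]:
--         if firstCard == None or firstCard == card:
--             firstCard = card
--             firstCount = firstCount + 1
--         elif secondCard == None or secondCard == card:
--             secondCard = card
--             secondCount = secondCount + 1
--         elif thirdCard == None or thirdCard == card:
--             thirdCard = card
--             thirdCount = thirdCount + 1
--         else:
--             return False
--     if firstCount == 3 or secondCount == 3 or thirdCount == 3: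
--         return True
--     return False
--
-- def isPair(bid):
--     firstCard = None
--     firstCount = 0
--     secondCard = None
--     secondCount = 0
--     thirdCard = None
--     thirdCount = 0
--     fourthCard = None
--     fourthCount = 0
--     for card in bid[0]:
--         if firstCard == None or firstCard == card:
--             firstCard = card
--             firstCount = firstCount + 1
--         elif secondCard == None or secondCard == card:
--             secondCard = card
--             secondCount = secondCount + 1
--         elif thirdCard == None or thirdCard == card:
--             thirdCard = card
--             thirdCount = thirdCount + 1
--         elif fourthCard == None or fourthCard == card:
--             fourthCard = card
--             fourthCount = fourthCount + 1
--         else: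
--             return False
--     if firstCount == 2 or secondCount == 2 or thirdCount == 2 or fourthCount == 2:
--         return True
--     return False
--
-- def isThreeWild(bid):
--     wildCount = 0
--     for card in bid[0]:
--         if card == 'J':
--             wildCount = wildCount + 1
--     if wildCount == 0:
--         return isThreeOfAKind(bid)
--     if wildCount == 1:
--         return isPair(bid)
--     return True
-- ===== SOURCE B (Python) =====
-- def isThreeWild(bid):
--     counts = {}
--     for card in bid[0]:
--         counts[card] = counts.get(card, 0) + 1
--     wild = counts.get('J', 0)
--     if wild >= 2:
--         return True
--     if wild == 1:
--         return len(counts) <= 4 and 2 in counts.values()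
--     return len(counts) <= 3 and 3 in counts.values()
-- ===== Notes on version B (the rewrite author's own statement) =====
-- stated objective: simpler
-- what changed: Replaces A's three hand-unrolled slot-assignment loops with early returns (isThreeOfAKind/isPair with 3 resp. 4 named card/count variable pairs) by one dictionary-counting pass followed by arithmetic tests on the counter: distinct-card bound via len(counts) and exact membership of 3 resp. 2 in counts.values().
import Mathlib
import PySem

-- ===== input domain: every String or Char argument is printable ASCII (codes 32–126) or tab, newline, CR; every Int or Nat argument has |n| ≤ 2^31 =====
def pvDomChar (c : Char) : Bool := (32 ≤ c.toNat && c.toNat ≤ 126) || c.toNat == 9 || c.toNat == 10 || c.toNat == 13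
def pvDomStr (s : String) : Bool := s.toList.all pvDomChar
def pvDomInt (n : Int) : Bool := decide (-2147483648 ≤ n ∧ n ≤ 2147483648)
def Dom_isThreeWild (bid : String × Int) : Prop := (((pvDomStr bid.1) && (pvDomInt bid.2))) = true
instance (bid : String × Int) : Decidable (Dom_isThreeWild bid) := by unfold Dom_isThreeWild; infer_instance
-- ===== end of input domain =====

-- B replaces A's unrolled slot loops by one counting pass plus tests on the counter (objective: simpler).

-- ===== PORT A =====
-- the loop of isThreeOfAKind: three (card, count) slots, early return False on a 4th distinct card
def threeLoop : List Char → Option Char → Int → Option Char → Int → Option Char → Int → Bool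
  | [], _, fc, _, sc, _, tc => fc == 3 || sc == 3 || tc == 3
  | card :: rest, f, fc, s, sc, t, tc =>
    if f = none ∨ f = some card then threeLoop rest (some card) (fc + 1) s sc t tc
    else if s = none ∨ s = some card then threeLoop rest f fc (some card) (sc + 1) t tc
    else if t = none ∨ t = some card then threeLoop rest f fc s sc (some card) (tc + 1)
    else false

def isThreeOfAKind (bid : String × Int) : Bool :=
  threeLoop bid.1.toList none 0 none 0 none 0

-- the loop of isPair: four (card, count) slots, early return False on a 5th distinct card
def pairLoop : List Char → Option Char → Int → Option Char → Int → Option Char → Int → Option Char → Int → Bool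
  | [], _, fc, _, sc, _, tc, _, qc => fc == 2 || sc == 2 || tc == 2 || qc == 2
  | card :: rest, f, fc, s, sc, t, tc, q, qc =>
    if f = none ∨ f = some card then pairLoop rest (some card) (fc + 1) s sc t tc q qc
    else if s = none ∨ s = some card then pairLoop rest f fc (some card) (sc + 1) t tc q qc
    else if t = none ∨ t = some card then pairLoop rest f fc s sc (some card) (tc + 1) q qc
    else if q = none ∨ q = some card then pairLoop rest f fc s sc t tc (some card) (qc + 1)
    else false

def isPair (bid : String × Int) : Bool :=
  pairLoop bid.1.toList none 0 none 0 none 0 none 0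

def isThreeWild (bid : String × Int) : Bool :=
  let wildCount : Int := bid.1.toList.foldl (fun acc card => if card == 'J' then acc + 1 else acc) 0
  if wildCount = 0 then isThreeOfAKind bid
  else if wildCount = 1 then isPair bid
  else true

-- ===== PORT B =====
def isThreeWild_alt (bid : String × Int) : Bool :=
  let counts : PySem.Dict Char Int :=
    bid.1.toList.foldl (fun d card => d.insert card (d.getD card 0 + 1)) PySem.Dict.empty
  let wild := counts.getD 'J' 0
  if wild ≥ 2 then true
  else if wild = 1 then decide (counts.size ≤ 4) && decide ((2 : Int) ∈ counts.values)
  else decide (counts.size ≤ 3) && decide ((3 : Int) ∈ counts.values)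

-- ===== PRECONDITION & SPEC =====
def Spec_isThreeWild (bid : String × Int) (out : Bool) : Prop := out = isThreeWild_alt bid
instance (bid : String × Int) (out : Bool) : Decidable (Spec_isThreeWild bid out) := by unfold Spec_isThreeWild; infer_instance

-- ===== CLAIM (what is proved, stated in full; the proofs are below) =====
def Claim_equal_isThreeWild : Prop := ∀ (bid : String × Int), Dom_isThreeWild bid → Spec_isThreeWild bid (isThreeWild bid)

-- ===== LEMMAS AND PROOFS =====

-- slot value at index i: the count (under cnt) of the i-th distinct card, 0 if the slot is empty
def ic (u : List Char) (cnt : Char → Int) (i : Nat) : Int := ((u[i]?).map cnt).getD 0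

theorem bump_count (cnt : Char → Int) (c k : Char) (rest : List Char) :
    Function.update cnt c (cnt c + 1) k + (rest.count k : Int) = cnt k + ((c :: rest).count k : Int) := by
  by_cases hk : k = c
  · subst hk; simp [List.count_cons_self]; ring
  · simp [Function.update_of_ne hk, List.count_cons_of_ne (by exact fun h => hk h.symm)]


theorem three_inv (l : List Char) : ∀ (u : List Char) (cnt : Char → Int), u.Nodup → u.length ≤ 3 →
    (∀ c, c ∉ u → cnt c = 0) →
    threeLoop l u[0]? (ic u cnt 0) u[1]? (ic u cnt 1) u[2]? (ic u cnt 2)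
      = decide ((PySem.Set.update u l).length ≤ 3 ∧ ∃ k ∈ PySem.Set.update u l, cnt k + (l.count k : Int) = 3) := by
  induction l with
  | nil =>
    intro u cnt hnd hlen h0
    rcases u with _|⟨a,_|⟨b,_|⟨d,_|⟨e,u⟩⟩⟩⟩ <;>
      simp_all [threeLoop, ic, PySem.Set.update_nil, Bool.beq_eq_decide_eq, Bool.or_assoc] <;> omega
  | cons c rest ih =>
    intro u cnt hnd hlen h0
    rcases u with _|⟨a,_|⟨b,_|⟨d,_|⟨e,u⟩⟩⟩⟩
    · -- u = []
      have h0c := h0 c (by simp)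
      have ih' := ih [c] (Function.update cnt c (cnt c + 1)) (by simp) (by simp)
        (fun x hx => by
          simp at hx
          rw [Function.update_of_ne hx]; exact h0 x (by simp))
      simp only [bump_count] at ih'
      simp only [threeLoop]
      simp [ic, h0c, PySem.Set.update_cons, PySem.Set.add] at ih' ⊢
      exact ih'
    · -- u = [a]
      simp only [List.nodup_cons] at hnd
      by_cases hac : a = c
      · subst hac
        have ih' := ih [a] (Function.update cnt a (cnt a + 1)) (by simp) (by simp)
          (fun x hx => by
            simp at hx
            rw [Function.update_of_ne hx]; exact h0 x (by simp [hx]))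
        simp only [bump_count] at ih'
        simp only [threeLoop]
        simp [ic, PySem.Set.update_cons, PySem.Set.add] at ih' ⊢
        exact ih'
      · have h0c := h0 c (by simp [Ne.symm hac])
        have ih' := ih [a, c] (Function.update cnt c (cnt c + 1)) (by simp [hac]) (by simp)
          (fun x hx => by
            simp at hx
            rw [Function.update_of_ne hx.2]; exact h0 x (by simp [hx.1]))
        simp only [bump_count] at ih'
        simp only [threeLoop]
        simp [ic, h0c, hac, Function.update_of_ne (by exact hac), PySem.Set.update_cons,
          PySem.Set.add, Ne.symm hac] at ih' ⊢
        exact ih'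
    · -- u = [a, b]
      simp only [List.nodup_cons, List.mem_cons, List.mem_singleton] at hnd
      obtain ⟨hab2, hbnd⟩ := hnd
      have hab : a ≠ b := by simp at hab2; exact hab2
      by_cases hac : a = c
      · subst hac
        have ih' := ih [a, b] (Function.update cnt a (cnt a + 1)) (by simp [hab]) (by simp)
          (fun x hx => by
            simp at hx
            rw [Function.update_of_ne hx.1]; exact h0 x (by simp [hx.1, hx.2]))
        simp only [bump_count] at ih'
        simp only [threeLoop]
        simp [ic, Function.update_of_ne (by exact Ne.symm hab),
          PySem.Set.update_cons, PySem.Set.add] at ih' ⊢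
        exact ih'
      · by_cases hbc : b = c
        · subst hbc
          have ih' := ih [a, b] (Function.update cnt b (cnt b + 1)) (by simp [hab]) (by simp)
            (fun x hx => by
              simp at hx
              rw [Function.update_of_ne hx.2]; exact h0 x (by simp [hx.1, hx.2]))
          simp only [bump_count] at ih'
          simp only [threeLoop]
          simp [ic, hab, hac, Function.update_of_ne hab,
            PySem.Set.update_cons, PySem.Set.add] at ih' ⊢
          exact ih'
        · have h0c := h0 c (by simp [Ne.symm hac, Ne.symm hbc])
          have ih' := ih [a, b, c] (Function.update cnt c (cnt c + 1))
            (by simp [hab, hac, hbc]) (by simp)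
            (fun x hx => by
              simp at hx
              rw [Function.update_of_ne hx.2.2]; exact h0 x (by simp [hx.1, hx.2.1]))
          simp only [bump_count] at ih'
          simp only [threeLoop]
          simp [ic, h0c, hac, hbc, Function.update_of_ne (by exact hac),
            Function.update_of_ne (by exact hbc), PySem.Set.update_cons, PySem.Set.add,
            Ne.symm hac, Ne.symm hbc] at ih' ⊢
          exact ih'
    · -- u = [a, b, d]
      simp only [List.nodup_cons, List.mem_cons, List.mem_singleton, List.not_mem_nil] at hnd
      have hab : a ≠ b := by tauto
      have had : a ≠ d := by tauto
      have hbd : b ≠ d := by tauto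
      by_cases hac : a = c
      · subst hac
        have ih' := ih [a, b, d] (Function.update cnt a (cnt a + 1))
          (by simp [hab, had, hbd]) (by simp)
          (fun x hx => by
            simp at hx
            rw [Function.update_of_ne hx.1]; exact h0 x (by simp [hx.1, hx.2.1, hx.2.2]))
        simp only [bump_count] at ih'
        simp only [threeLoop]
        simp [ic, Function.update_of_ne (by exact Ne.symm hab),
          Function.update_of_ne (by exact Ne.symm had),
          PySem.Set.update_cons, PySem.Set.add] at ih' ⊢
        exact ih'
      · by_cases hbc : b = c
        · subst hbc
          have ih' := ih [a, b, d] (Function.update cnt b (cnt b + 1))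
            (by simp [hab, had, hbd]) (by simp)
            (fun x hx => by
              simp at hx
              rw [Function.update_of_ne hx.2.1]; exact h0 x (by simp [hx.1, hx.2.1, hx.2.2]))
          simp only [bump_count] at ih'
          simp only [threeLoop]
          simp [ic, hac, Function.update_of_ne hab,
            Function.update_of_ne (by exact Ne.symm hbd),
            PySem.Set.update_cons, PySem.Set.add] at ih' ⊢
          exact ih'
        · by_cases hdc : d = c
          · subst hdc
            have ih' := ih [a, b, d] (Function.update cnt d (cnt d + 1))
              (by simp [hab, had, hbd]) (by simp)
              (fun x hx => by
                simp at hx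
                rw [Function.update_of_ne hx.2.2]; exact h0 x (by simp [hx.1, hx.2.1, hx.2.2]))
            simp only [bump_count] at ih'
            simp only [threeLoop]
            simp [ic, hac, hbc, Function.update_of_ne had,
              Function.update_of_ne hbd,
              PySem.Set.update_cons, PySem.Set.add] at ih' ⊢
            exact ih'
          · -- fourth distinct card: A returns False, and the final set has length ≥ 4
            simp only [threeLoop]
            rw [if_neg (by simp [hac]), if_neg (by simp [hbc]), if_neg (by simp [hdc])]
            rw [eq_comm, decide_eq_false_iff_not]
            rintro ⟨h1, -⟩
            rw [PySem.Set.update_cons,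
              PySem.Set.add_of_not_mem (by simp [Ne.symm hac,
                Ne.symm hbc, Ne.symm hdc]),
              PySem.Set.update_eq_append_filter] at h1
            simp [List.length_append] at h1
            omega
    · simp at hlen; omega

theorem pair_inv (l : List Char) : ∀ (u : List Char) (cnt : Char → Int), u.Nodup → u.length ≤ 4 →
    (∀ c, c ∉ u → cnt c = 0) →
    pairLoop l u[0]? (ic u cnt 0) u[1]? (ic u cnt 1) u[2]? (ic u cnt 2) u[3]? (ic u cnt 3)
      = decide ((PySem.Set.update u l).length ≤ 4 ∧ ∃ k ∈ PySem.Set.update u l, cnt k + (l.count k : Int) = 2) := by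
  induction l with
  | nil =>
    intro u cnt hnd hlen h0
    rcases u with _|⟨a,_|⟨b,_|⟨d,_|⟨e,_|⟨f,u⟩⟩⟩⟩⟩ <;>
      simp_all [pairLoop, ic, PySem.Set.update_nil, Bool.beq_eq_decide_eq, Bool.or_assoc] <;> omega
  | cons c rest ih =>
    intro u cnt hnd hlen h0
    rcases u with _|⟨a,_|⟨b,_|⟨d,_|⟨e,_|⟨f,u⟩⟩⟩⟩⟩
    · -- u = []
      have h0c := h0 c (by simp)
      have ih' := ih [c] (Function.update cnt c (cnt c + 1))
        (by simp) (by simp)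
        (fun x hx => by
          simp at hx
          rw [Function.update_of_ne hx]; exact h0 x (by simp))
      simp only [bump_count] at ih'
      simp only [pairLoop]
      simp [ic, h0c, PySem.Set.update_cons, PySem.Set.add] at ih' ⊢
      exact ih'
    · -- u = ['a']
      by_cases hac' : a = c
      · subst hac'
        have ih' := ih [a] (Function.update cnt a (cnt a + 1))
          (by simp) (by simp)
          (fun x hx => by
            simp at hx
            rw [Function.update_of_ne hx]; exact h0 x (by simp [hx]))
        simp only [bump_count] at ih'
        simp only [pairLoop]
        simp [ic, PySem.Set.update_cons, PySem.Set.add] at ih' ⊢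
        exact ih'
      · have hac : a ≠ c := hac'
        have h0c := h0 c (by simp [Ne.symm hac])
        have ih' := ih [a, c] (Function.update cnt c (cnt c + 1))
          (by simp [hac]) (by simp)
          (fun x hx => by
            simp at hx
            rw [Function.update_of_ne hx.2]; exact h0 x (by simp [hx.1]))
        simp only [bump_count] at ih'
        simp only [pairLoop]
        simp [ic, h0c, Function.update_of_ne (by exact hac), hac, Ne.symm hac, PySem.Set.update_cons, PySem.Set.add] at ih' ⊢
        exact ih'
    · -- u = ['a', 'b']
      simp only [List.nodup_cons, List.mem_cons, List.not_mem_nil] at hnd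
      have hab : a ≠ b := by tauto
      by_cases hac' : a = c
      · subst hac'
        have ih' := ih [a, b] (Function.update cnt a (cnt a + 1))
          (by simp [hab]) (by simp)
          (fun x hx => by
            simp at hx
            rw [Function.update_of_ne hx.1]; exact h0 x (by simp [hx.1, hx.2]))
        simp only [bump_count] at ih'
        simp only [pairLoop]
        simp [ic, Function.update_of_ne (by exact Ne.symm hab), PySem.Set.update_cons, PySem.Set.add] at ih' ⊢
        exact ih'
      · have hac : a ≠ c := hac'
        by_cases hbc' : b = c
        · subst hbc'
          have ih' := ih [a, b] (Function.update cnt b (cnt b + 1))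
            (by simp [hab]) (by simp)
            (fun x hx => by
              simp at hx
              rw [Function.update_of_ne hx.2]; exact h0 x (by simp [hx.1, hx.2]))
          simp only [bump_count] at ih'
          simp only [pairLoop]
          simp [ic, Function.update_of_ne (by exact hab), hac, PySem.Set.update_cons, PySem.Set.add] at ih' ⊢
          exact ih'
        · have hbc : b ≠ c := hbc'
          have h0c := h0 c (by simp [Ne.symm hac, Ne.symm hbc])
          have ih' := ih [a, b, c] (Function.update cnt c (cnt c + 1))
            (by simp [hab, hac, hbc]) (by simp)
            (fun x hx => by
              simp at hx
              rw [Function.update_of_ne hx.2.2]; exact h0 x (by simp [hx.1, hx.2.1]))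
          simp only [bump_count] at ih'
          simp only [pairLoop]
          simp [ic, h0c, Function.update_of_ne (by exact hac), Function.update_of_ne (by exact hbc), hac, hbc, Ne.symm hac, Ne.symm hbc, PySem.Set.update_cons, PySem.Set.add] at ih' ⊢
          exact ih'
    · -- u = ['a', 'b', 'd']
      simp only [List.nodup_cons, List.mem_cons, List.not_mem_nil] at hnd
      have hab : a ≠ b := by tauto
      have had : a ≠ d := by tauto
      have hbd : b ≠ d := by tauto
      by_cases hac' : a = c
      · subst hac'
        have ih' := ih [a, b, d] (Function.update cnt a (cnt a + 1))
          (by simp [hab, had, hbd]) (by simp)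
          (fun x hx => by
            simp at hx
            rw [Function.update_of_ne hx.1]; exact h0 x (by simp [hx.1, hx.2.1, hx.2.2]))
        simp only [bump_count] at ih'
        simp only [pairLoop]
        simp [ic, Function.update_of_ne (by exact Ne.symm hab), Function.update_of_ne (by exact Ne.symm had), PySem.Set.update_cons, PySem.Set.add] at ih' ⊢
        exact ih'
      · have hac : a ≠ c := hac'
        by_cases hbc' : b = c
        · subst hbc'
          have ih' := ih [a, b, d] (Function.update cnt b (cnt b + 1))
            (by simp [hab, had, hbd]) (by simp)
            (fun x hx => by
              simp at hx
              rw [Function.update_of_ne hx.2.1]; exact h0 x (by simp [hx.1, hx.2.1, hx.2.2]))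
          simp only [bump_count] at ih'
          simp only [pairLoop]
          simp [ic, Function.update_of_ne (by exact hab), Function.update_of_ne (by exact Ne.symm hbd), hac, PySem.Set.update_cons, PySem.Set.add] at ih' ⊢
          exact ih'
        · have hbc : b ≠ c := hbc'
          by_cases hdc' : d = c
          · subst hdc'
            have ih' := ih [a, b, d] (Function.update cnt d (cnt d + 1))
              (by simp [hab, had, hbd]) (by simp)
              (fun x hx => by
                simp at hx
                rw [Function.update_of_ne hx.2.2]; exact h0 x (by simp [hx.1, hx.2.1, hx.2.2]))
            simp only [bump_count] at ih'
            simp only [pairLoop]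
            simp [ic, Function.update_of_ne (by exact had), Function.update_of_ne (by exact hbd), hac, hbc, PySem.Set.update_cons, PySem.Set.add] at ih' ⊢
            exact ih'
          · have hdc : d ≠ c := hdc'
            have h0c := h0 c (by simp [Ne.symm hac, Ne.symm hbc, Ne.symm hdc])
            have ih' := ih [a, b, d, c] (Function.update cnt c (cnt c + 1))
              (by simp [hab, had, hbd, hac, hbc, hdc]) (by simp)
              (fun x hx => by
                simp at hx
                rw [Function.update_of_ne hx.2.2.2]; exact h0 x (by simp [hx.1, hx.2.1, hx.2.2.1]))
            simp only [bump_count] at ih'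
            simp only [pairLoop]
            simp [ic, h0c, Function.update_of_ne (by exact hac), Function.update_of_ne (by exact hbc), Function.update_of_ne (by exact hdc), hac, hbc, hdc, Ne.symm hac, Ne.symm hbc, Ne.symm hdc, PySem.Set.update_cons, PySem.Set.add] at ih' ⊢
            exact ih'
    · -- u = ['a', 'b', 'd', 'e'], possibly a fifth distinct card
      simp only [List.nodup_cons, List.mem_cons, List.not_mem_nil] at hnd
      have hab : a ≠ b := by tauto
      have had : a ≠ d := by tauto
      have hae : a ≠ e := by tauto
      have hbd : b ≠ d := by tauto
      have hbe : b ≠ e := by tauto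
      have hde : d ≠ e := by tauto
      by_cases hac' : a = c
      · subst hac'
        have ih' := ih [a, b, d, e] (Function.update cnt a (cnt a + 1))
          (by simp [hab, had, hae, hbd, hbe, hde]) (by simp)
          (fun x hx => by
            simp at hx
            rw [Function.update_of_ne hx.1]; exact h0 x (by simp [hx.1, hx.2.1, hx.2.2.1, hx.2.2.2]))
        simp only [bump_count] at ih'
        simp only [pairLoop]
        simp [ic, Function.update_of_ne (by exact Ne.symm hab), Function.update_of_ne (by exact Ne.symm had), Function.update_of_ne (by exact Ne.symm hae), PySem.Set.update_cons, PySem.Set.add] at ih' ⊢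
        exact ih'
      · have hac : a ≠ c := hac'
        by_cases hbc' : b = c
        · subst hbc'
          have ih' := ih [a, b, d, e] (Function.update cnt b (cnt b + 1))
            (by simp [hab, had, hae, hbd, hbe, hde]) (by simp)
            (fun x hx => by
              simp at hx
              rw [Function.update_of_ne hx.2.1]; exact h0 x (by simp [hx.1, hx.2.1, hx.2.2.1, hx.2.2.2]))
          simp only [bump_count] at ih'
          simp only [pairLoop]
          simp [ic, Function.update_of_ne (by exact hab), Function.update_of_ne (by exact Ne.symm hbd), Function.update_of_ne (by exact Ne.symm hbe), hac, PySem.Set.update_cons, PySem.Set.add] at ih' ⊢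
          exact ih'
        · have hbc : b ≠ c := hbc'
          by_cases hdc' : d = c
          · subst hdc'
            have ih' := ih [a, b, d, e] (Function.update cnt d (cnt d + 1))
              (by simp [hab, had, hae, hbd, hbe, hde]) (by simp)
              (fun x hx => by
                simp at hx
                rw [Function.update_of_ne hx.2.2.1]; exact h0 x (by simp [hx.1, hx.2.1, hx.2.2.1, hx.2.2.2]))
            simp only [bump_count] at ih'
            simp only [pairLoop]
            simp [ic, Function.update_of_ne (by exact had), Function.update_of_ne (by exact hbd), Function.update_of_ne (by exact Ne.symm hde), hac, hbc, PySem.Set.update_cons, PySem.Set.add] at ih' ⊢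
            exact ih'
          · have hdc : d ≠ c := hdc'
            by_cases hec' : e = c
            · subst hec'
              have ih' := ih [a, b, d, e] (Function.update cnt e (cnt e + 1))
                (by simp [hab, had, hae, hbd, hbe, hde]) (by simp)
                (fun x hx => by
                  simp at hx
                  rw [Function.update_of_ne hx.2.2.2]; exact h0 x (by simp [hx.1, hx.2.1, hx.2.2.1, hx.2.2.2]))
              simp only [bump_count] at ih'
              simp only [pairLoop]
              simp [ic, Function.update_of_ne (by exact hae), Function.update_of_ne (by exact hbe), Function.update_of_ne (by exact hde), hac, hbc, hdc, PySem.Set.update_cons, PySem.Set.add] at ih' ⊢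
              exact ih'
            · have hec : e ≠ c := hec'
              -- fifth distinct card: A returns False, and the final set has length ≥ 5
              simp only [pairLoop]
              rw [if_neg (by simp [hac]), if_neg (by simp [hbc]), if_neg (by simp [hdc]), if_neg (by simp [hec])]
              rw [eq_comm, decide_eq_false_iff_not]
              rintro ⟨h1, -⟩
              rw [PySem.Set.update_cons,
                PySem.Set.add_of_not_mem (by simp [Ne.symm hac, Ne.symm hbc, Ne.symm hdc, Ne.symm hec]),
                PySem.Set.update_eq_append_filter] at h1
              simp [List.length_append] at h1
              omega
    · simp at hlen; omega

theorem three_main (l : List Char) :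
    threeLoop l none 0 none 0 none 0
      = (decide ((PySem.Dict.counter l : PySem.Dict Char Int).size ≤ 3) &&
         decide ((3 : Int) ∈ (PySem.Dict.counter l : PySem.Dict Char Int).values)) := by
  have h := three_inv l [] (fun _ => 0) (by simp) (by simp) (fun _ _ => rfl)
  simp only [ic, List.getElem?_nil, Option.map_none, Option.getD_none] at h
  rw [h]
  rw [Bool.eq_iff_iff]
  simp only [Bool.and_eq_true, decide_eq_true_eq, PySem.Dict.size, PySem.Dict.values,
    PySem.Dict.items_counter, PySem.Set.update_nil_left, List.length_map, List.map_map,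
    List.mem_map, Function.comp]
  constructor
  · rintro ⟨h1, k, hk, hc⟩
    exact ⟨h1, k, hk, by omega⟩
  · rintro ⟨h1, k, hk, hc⟩
    exact ⟨h1, k, hk, by omega⟩

theorem pair_main (l : List Char) :
    pairLoop l none 0 none 0 none 0 none 0
      = (decide ((PySem.Dict.counter l : PySem.Dict Char Int).size ≤ 4) &&
         decide ((2 : Int) ∈ (PySem.Dict.counter l : PySem.Dict Char Int).values)) := by
  have h := pair_inv l [] (fun _ => 0) (by simp) (by simp) (fun _ _ => rfl)
  simp only [ic, List.getElem?_nil, Option.map_none, Option.getD_none] at h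
  rw [h]
  rw [Bool.eq_iff_iff]
  simp only [Bool.and_eq_true, decide_eq_true_eq, PySem.Dict.size, PySem.Dict.values,
    PySem.Dict.items_counter, PySem.Set.update_nil_left, List.length_map, List.map_map,
    List.mem_map, Function.comp]
  constructor
  · rintro ⟨h1, k, hk, hc⟩
    exact ⟨h1, k, hk, by omega⟩
  · rintro ⟨h1, k, hk, hc⟩
    exact ⟨h1, k, hk, by omega⟩

-- ===== VERDICT (by name: the statement is the Claim_ definition above) =====
theorem isThreeWild_spec : Claim_equal_isThreeWild := by
  intro bid _
  unfold Spec_isThreeWild isThreeWild isThreeWild_alt isThreeOfAKind isPair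
  simp only [PySem.List.foldl_beq_add_one, PySem.Dict.foldl_insert_getD_add_one_eq_counter,
    PySem.Dict.getD_counter, zero_add]
  rcases hn : bid.1.toList.count 'J' with _ | _ | m
  · norm_num
    exact three_main _
  · norm_num
    exact pair_main _
  · rw [if_neg (by push_cast; omega), if_neg (by push_cast; omega), if_pos (by push_cast; omega)]
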